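-- pv_equiv track=rewrite | github.com/Aasthaengg/IBMdataset | Python_codes/p03340/s056253120.py | shakutori
-- ===== SOURCE A (Python) =====
-- def shakutori(a):
--     left =0
--     right = 0
--     su = 0
--     su1 = 0
--     ans = 0
--     for left in range(len(a)):
--         while right<len(a) and su+a[right]==su1^a[right]:
--             su +=a[right]
--             su1 = su1^a[right]
--             right +=1
--         ans+=right -left
--         if left==right:
--             right+=1
--         else:
--             su -=a[left]
--             su1 ^= a[left]
--     return ans
-- ===== SOURCE B (Python) =====
-- def shakutori(a):
--     # Simpler: count subarrays whose elements are pairwise bit-disjoint (sum == xor),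
--     # restarting a fresh bitwise-OR scan for each left endpoint; no xor/sum bookkeeping.
--     n = len(a)
--     ans = 0
--     for l in range(n):
--         cur = 0
--         r = l
--         while r < n and cur & a[r] == 0:
--             cur |= a[r]
--             r += 1
--         ans += r - l
--     return ans
-- ===== Notes on version B (the rewrite author's own statement) =====
-- stated objective: simpler
-- what changed: Replaced the sliding-window two-pointer with separate sum and xor accumulators by a fresh per-left scan maintaining a single bitwise-OR accumulator, using the fact that sum == xor of a window exactly when its elements are pairwise bit-disjoint.
import Mathlib
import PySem

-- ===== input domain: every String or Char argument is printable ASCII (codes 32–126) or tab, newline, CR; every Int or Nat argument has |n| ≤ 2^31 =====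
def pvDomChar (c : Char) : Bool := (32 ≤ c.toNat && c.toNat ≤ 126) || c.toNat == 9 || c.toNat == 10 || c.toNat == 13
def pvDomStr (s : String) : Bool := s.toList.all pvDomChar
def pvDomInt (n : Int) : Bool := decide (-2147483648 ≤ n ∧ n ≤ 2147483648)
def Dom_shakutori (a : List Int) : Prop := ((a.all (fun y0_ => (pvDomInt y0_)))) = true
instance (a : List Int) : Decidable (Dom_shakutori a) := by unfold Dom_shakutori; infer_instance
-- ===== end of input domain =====

-- B replaces A's sliding-window sum/xor bookkeeping by a fresh bitwise-OR scan per left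
-- endpoint (sum == xor of a window ⟺ its elements are pairwise bit-disjoint): simpler state.

-- ===== PORT A =====
-- the inner while loop of A; list indexing a[right] is guarded by right < len(a),
-- so `getD right 0` is exact (the default 0 is never read)
def shakutoriWhile (a : List Int) (right : Nat) (su su1 : Int) : Nat × Int × Int :=
  if _ : right < a.length ∧ su + a.getD right 0 = PySem.Int.bxor su1 (a.getD right 0) then
    shakutoriWhile a (right + 1) (su + a.getD right 0) (PySem.Int.bxor su1 (a.getD right 0))
  else (right, su, su1)
termination_by a.length - right
decreasing_by omega

def shakutoriStep (a : List Int) (st : Nat × Int × Int × Int) (left : Nat) : Nat × Int × Int × Int :=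
  let w := shakutoriWhile a st.1 st.2.1 st.2.2.1
  let ans := st.2.2.2 + ((w.1 : Int) - (left : Int))
  if left = w.1 then (w.1 + 1, w.2.1, w.2.2, ans)
  else (w.1, w.2.1 - a.getD left 0, PySem.Int.bxor w.2.2 (a.getD left 0), ans)

def shakutori (a : List Int) : Int :=
  ((List.range a.length).foldl (shakutoriStep a) (0, 0, 0, 0)).2.2.2

-- ===== PORT B =====
-- the inner while loop of B; indexing again guarded by r < len(a)
def shakutoriScan (a : List Int) (cur : Int) (r : Nat) : Nat :=
  if _ : r < a.length ∧ PySem.Int.band cur (a.getD r 0) = 0 then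
    shakutoriScan a (PySem.Int.bor cur (a.getD r 0)) (r + 1)
  else r
termination_by a.length - r
decreasing_by omega

def shakutori_alt (a : List Int) : Int :=
  (List.range a.length).foldl
    (fun (ans : Int) (l : Nat) => ans + ((shakutoriScan a 0 l : Int) - (l : Int))) 0

-- ===== PRECONDITION & SPEC =====
def Spec_shakutori (a : List Int) (out : Int) : Prop := out = shakutori_alt a
instance (a : List Int) (out : Int) : Decidable (Spec_shakutori a out) := by unfold Spec_shakutori; infer_instance

-- ===== CLAIM (what is proved, stated in full; the proofs are below) =====
def Claim_equal_shakutori : Prop := ∀ (a : List Int), Dom_shakutori a → Spec_shakutori a (shakutori a)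

-- ===== LEMMAS AND PROOFS =====
-- Nat-level identities linking +, ^^^, &&&, |||
-- parity of &&&, |||, ^^^ as linear facts
theorem pvNatAndMod2 (m n : Nat) : (m &&& n) % 2 = 1 ↔ (m % 2 = 1 ∧ n % 2 = 1) := by
  have h := Nat.testBit_and m n 0
  simp only [Nat.testBit_zero] at h
  constructor
  · intro hx; rw [decide_eq_true hx] at h
    exact ⟨of_decide_eq_true (by exact (Bool.and_eq_true _ _).mp h.symm |>.1),
           of_decide_eq_true (by exact (Bool.and_eq_true _ _).mp h.symm |>.2)⟩
  · rintro ⟨h1, h2⟩; rw [decide_eq_true h1, decide_eq_true h2] at h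
    simpa using h
theorem pvNatOrMod2 (m n : Nat) : (m ||| n) % 2 = 1 ↔ (m % 2 = 1 ∨ n % 2 = 1) := by
  have h := Nat.testBit_or m n 0
  simp only [Nat.testBit_zero] at h
  rcases Nat.mod_two_eq_zero_or_one m with hm | hm <;>
    rcases Nat.mod_two_eq_zero_or_one n with hn | hn <;>
      rw [hm, hn] at h ⊢ <;> simp_all
theorem pvNatXorMod2 (m n : Nat) : (m ^^^ n) % 2 = (m + n) % 2 := Nat.xor_mod_two_eq

-- master Nat identities
theorem pvNatAddEq (m n : Nat) : m + n = (m ^^^ n) + 2 * (m &&& n) := by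
  induction m using Nat.strong_induction_on generalizing n with
  | _ m ih =>
    rcases Nat.eq_zero_or_pos m with rfl | hm
    · simp
    · have hlt : m / 2 < m := Nat.div_lt_self hm (by norm_num)
      have h := ih (m / 2) hlt (n / 2)
      have e1 : (m ^^^ n) / 2 = m / 2 ^^^ n / 2 := Nat.xor_div_two
      have e2 : (m &&& n) / 2 = m / 2 &&& n / 2 := Nat.and_div_two
      rw [← e1, ← e2] at h
      have p1 := pvNatXorMod2 m n
      have p2 := pvNatAndMod2 m n
      omega
theorem pvNatOrEq (m n : Nat) : m ||| n = (m ^^^ n) + (m &&& n) := by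
  induction m using Nat.strong_induction_on generalizing n with
  | _ m ih =>
    rcases Nat.eq_zero_or_pos m with rfl | hm
    · simp
    · have hlt : m / 2 < m := Nat.div_lt_self hm (by norm_num)
      have h := ih (m / 2) hlt (n / 2)
      have e1 : (m ^^^ n) / 2 = m / 2 ^^^ n / 2 := Nat.xor_div_two
      have e2 : (m &&& n) / 2 = m / 2 &&& n / 2 := Nat.and_div_two
      have e3 : (m ||| n) / 2 = m / 2 ||| n / 2 := Nat.or_div_two
      rw [← e1, ← e2] at h
      have p1 := pvNatXorMod2 m n
      have p2 := pvNatAndMod2 m n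
      have p3 := pvNatOrMod2 m n
      omega
theorem pvNatSubAnd (m n : Nat) : m - (m &&& n) = m ^^^ (m &&& n) := by
  have habs : m &&& (m &&& n) = m &&& n := by
    rw [← Nat.and_assoc, Nat.and_self]
  have h := pvNatAddEq m (m &&& n)
  rw [habs] at h
  have h3 : m &&& n ≤ m := Nat.and_le_left
  omega

-- bit k of an integer in infinite two's complement
def pvTb (x : Int) (k : Nat) : Bool :=
  if 0 ≤ x then x.toNat.testBit k else !((-x - 1).toNat.testBit k)

theorem pvTb_band (x y : Int) (k : Nat) :
    pvTb (PySem.Int.band x y) k = (pvTb x k && pvTb y k) := by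
  unfold PySem.Int.band
  by_cases hx : 0 ≤ x <;> by_cases hy : 0 ≤ y <;> simp only [hx, hy, if_true, if_false]
  · have h1 : (0:Int) ≤ ((x.toNat &&& y.toNat : Nat) : Int) := Int.natCast_nonneg _
    simp [pvTb, hx, hy, h1, Nat.testBit_and]
  · have h1 : (0:Int) ≤ ((x.toNat - (x.toNat &&& (-y-1).toNat) : Nat) : Int) := Int.natCast_nonneg _
    simp only [pvTb, hx, hy, h1, if_true, if_false, Int.toNat_natCast]
    rw [pvNatSubAnd, Nat.testBit_xor, Nat.testBit_and]
    cases x.toNat.testBit k <;> cases (-y-1).toNat.testBit k <;> rfl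
  · have h1 : (0:Int) ≤ ((y.toNat - (y.toNat &&& (-x-1).toNat) : Nat) : Int) := Int.natCast_nonneg _
    simp only [pvTb, hx, hy, h1, if_true, if_false, Int.toNat_natCast]
    rw [pvNatSubAnd, Nat.testBit_xor, Nat.testBit_and]
    cases y.toNat.testBit k <;> cases (-x-1).toNat.testBit k <;> rfl
  · have h1 : ¬ (0:Int) ≤ -((((-x-1).toNat ||| (-y-1).toNat : Nat)) : Int) - 1 := by
      have := Int.natCast_nonneg ((-x-1).toNat ||| (-y-1).toNat); omega
    simp only [pvTb, hx, hy, h1, if_false]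
    have h2 : (-(-((((-x-1).toNat ||| (-y-1).toNat : Nat)) : Int) - 1) - 1).toNat
        = ((-x-1).toNat ||| (-y-1).toNat) := by omega
    rw [h2, Nat.testBit_or]
    cases (-x-1).toNat.testBit k <;> cases (-y-1).toNat.testBit k <;> rfl

theorem pvTb_bxor (x y : Int) (k : Nat) :
    pvTb (PySem.Int.bxor x y) k = (pvTb x k ^^ pvTb y k) := by
  unfold PySem.Int.bxor
  by_cases hx : 0 ≤ x <;> by_cases hy : 0 ≤ y <;> simp only [hx, hy, if_true, if_false]
  · have h1 : (0:Int) ≤ ((x.toNat ^^^ y.toNat : Nat) : Int) := Int.natCast_nonneg _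
    simp [pvTb, hx, hy, h1, Nat.testBit_xor]
  · have h1 : ¬ (0:Int) ≤ -(((x.toNat ^^^ (-y-1).toNat : Nat)) : Int) - 1 := by
      have := Int.natCast_nonneg (x.toNat ^^^ (-y-1).toNat); omega
    simp only [pvTb, hx, hy, h1, if_true, if_false]
    have h2 : (-(-((((x.toNat ^^^ (-y-1).toNat : Nat)) : Int)) - 1) - 1).toNat
        = (x.toNat ^^^ (-y-1).toNat) := by omega
    rw [h2, Nat.testBit_xor]
    cases x.toNat.testBit k <;> cases (-y-1).toNat.testBit k <;> rfl
  · have h1 : ¬ (0:Int) ≤ -((((-x-1).toNat ^^^ y.toNat : Nat)) : Int) - 1 := by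
      have := Int.natCast_nonneg ((-x-1).toNat ^^^ y.toNat); omega
    simp only [pvTb, hx, hy, h1, if_true, if_false]
    have h2 : (-(-(((((-x-1).toNat ^^^ y.toNat : Nat)) : Int)) - 1) - 1).toNat
        = ((-x-1).toNat ^^^ y.toNat) := by omega
    rw [h2, Nat.testBit_xor]
    cases (-x-1).toNat.testBit k <;> cases y.toNat.testBit k <;> rfl
  · have h1 : (0:Int) ≤ (((-x-1).toNat ^^^ (-y-1).toNat : Nat) : Int) := Int.natCast_nonneg _
    simp only [pvTb, hx, hy, h1, if_true, if_false, Int.toNat_natCast]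
    rw [Nat.testBit_xor]
    cases (-x-1).toNat.testBit k <;> cases (-y-1).toNat.testBit k <;> rfl

-- a value with all bits false is 0
theorem pvTb_zero_of_all_false (v : Int) (h : ∀ k, pvTb v k = false) : v = 0 := by
  by_cases hv : 0 ≤ v
  · have : v.toNat = 0 := by
      apply Nat.eq_of_testBit_eq
      intro i
      have := h i
      simp [pvTb, hv] at this
      simp [this]
    omega
  · exfalso
    have hk := h ((-v-1).toNat)
    simp only [pvTb, hv, if_false, Bool.not_eq_false'] at hk
    have : (-v-1).toNat < 2 ^ (-v-1).toNat := Nat.lt_two_pow_self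
    rw [Nat.testBit_lt_two_pow this] at hk
    exact Bool.false_ne_true hk

-- extensionality
theorem pvTb_ext {x y : Int} (h : ∀ k, pvTb x k = pvTb y k) : x = y := by
  by_cases hx : 0 ≤ x <;> by_cases hy : 0 ≤ y
  · have : x.toNat = y.toNat := by
      apply Nat.eq_of_testBit_eq; intro i
      have := h i; simpa [pvTb, hx, hy] using this
    omega
  · exfalso
    have hk := h (x.toNat + (-y-1).toNat)
    simp only [pvTb, hx, hy, if_true, if_false] at hk
    rw [Nat.testBit_lt_two_pow, Nat.testBit_lt_two_pow] at hk
    · exact absurd hk (by simp)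
    · calc (-y-1).toNat < 2 ^ (-y-1).toNat := Nat.lt_two_pow_self
        _ ≤ 2 ^ (x.toNat + (-y-1).toNat) := Nat.pow_le_pow_right (by norm_num) (by omega)
    · calc x.toNat < 2 ^ x.toNat := Nat.lt_two_pow_self
        _ ≤ 2 ^ (x.toNat + (-y-1).toNat) := Nat.pow_le_pow_right (by norm_num) (by omega)
  · exfalso
    have hk := h (y.toNat + (-x-1).toNat)
    simp only [pvTb, hx, hy, if_true, if_false] at hk
    rw [Nat.testBit_lt_two_pow, Nat.testBit_lt_two_pow] at hk
    · exact absurd hk (by simp)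
    · calc y.toNat < 2 ^ y.toNat := Nat.lt_two_pow_self
        _ ≤ 2 ^ (y.toNat + (-x-1).toNat) := Nat.pow_le_pow_right (by norm_num) (by omega)
    · calc (-x-1).toNat < 2 ^ (-x-1).toNat := Nat.lt_two_pow_self
        _ ≤ 2 ^ (y.toNat + (-x-1).toNat) := Nat.pow_le_pow_right (by norm_num) (by omega)
  · have : (-x-1).toNat = (-y-1).toNat := by
      apply Nat.eq_of_testBit_eq; intro i
      have := h i; simp only [pvTb, hx, hy, if_false, Bool.not_inj_iff] at this; exact this
    omega

-- band = 0 iff no common bit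
theorem pvBandZeroIff (x y : Int) :
    PySem.Int.band x y = 0 ↔ ∀ k, ¬(pvTb x k = true ∧ pvTb y k = true) := by
  constructor
  · intro h k hc
    have hb := pvTb_band x y k
    rw [h, hc.1, hc.2] at hb
    have t0 : pvTb (0:Int) k = false := by simp [pvTb]
    rw [t0] at hb; simp at hb
  · intro h
    apply pvTb_zero_of_all_false
    intro k
    rw [pvTb_band]
    have := h k
    cases hx : pvTb x k <;> cases hy : pvTb y k <;> simp_all

-- the window-extension condition "sum stays equal to xor" is bit-disjointness
theorem pvCondIff (x y : Int) : PySem.Int.band x y = 0 ↔ x + y = PySem.Int.bxor x y := by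
  unfold PySem.Int.band PySem.Int.bxor
  by_cases hx : 0 ≤ x <;> by_cases hy : 0 ≤ y <;> simp only [hx, hy, if_true, if_false]
  · have e := pvNatAddEq x.toNat y.toNat
    have hxx : (x.toNat : Int) = x := Int.toNat_of_nonneg hx
    have hyy : (y.toNat : Int) = y := Int.toNat_of_nonneg hy
    omega
  · have e := pvNatAddEq x.toNat (-y-1).toNat
    have h3 : x.toNat &&& (-y-1).toNat ≤ x.toNat := Nat.and_le_left
    have hxx : (x.toNat : Int) = x := Int.toNat_of_nonneg hx
    have hyy : ((-y-1).toNat : Int) = -y-1 := Int.toNat_of_nonneg (by omega)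
    omega
  · have e := pvNatAddEq y.toNat (-x-1).toNat
    have h3 : y.toNat &&& (-x-1).toNat ≤ y.toNat := Nat.and_le_left
    have hc : (-x-1).toNat ^^^ y.toNat = y.toNat ^^^ (-x-1).toNat := Nat.xor_comm _ _
    rw [hc]
    have hyy : (y.toNat : Int) = y := Int.toNat_of_nonneg hy
    have hxx : ((-x-1).toNat : Int) = -x-1 := Int.toNat_of_nonneg (by omega)
    omega
  · have hxx : ((-x-1).toNat : Int) = -x-1 := Int.toNat_of_nonneg (by omega)
    have hyy : ((-y-1).toNat : Int) = -y-1 := Int.toNat_of_nonneg (by omega)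
    omega

-- under disjointness, xor agrees with or
theorem pvXorEqOr (x y : Int) (h : PySem.Int.band x y = 0) :
    PySem.Int.bxor x y = PySem.Int.bor x y := by
  unfold PySem.Int.band at h
  unfold PySem.Int.bxor PySem.Int.bor
  by_cases hx : 0 ≤ x <;> by_cases hy : 0 ≤ y <;>
    simp only [hx, hy, if_true, if_false] at h ⊢
  · have e := pvNatOrEq x.toNat y.toNat
    omega
  · have e := pvNatAddEq x.toNat (-y-1).toNat
    have h3 : x.toNat &&& (-y-1).toNat ≤ x.toNat := Nat.and_le_left
    have hc : (-y-1).toNat &&& x.toNat = x.toNat &&& (-y-1).toNat := Nat.and_comm _ _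
    rw [hc]
    omega
  · have e := pvNatAddEq y.toNat (-x-1).toNat
    have h3 : y.toNat &&& (-x-1).toNat ≤ y.toNat := Nat.and_le_left
    have hc : (-x-1).toNat &&& y.toNat = y.toNat &&& (-x-1).toNat := Nat.and_comm _ _
    have hc2 : (-x-1).toNat ^^^ y.toNat = y.toNat ^^^ (-x-1).toNat := Nat.xor_comm _ _
    rw [hc, hc2]
    omega
  · exfalso
    have := Int.natCast_nonneg ((-x-1).toNat ||| (-y-1).toNat)
    omega

-- disjointness propagates to the xor-combined value
theorem pvK3 (x y z : Int) (h1 : PySem.Int.band x y = 0)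
    (h2 : PySem.Int.band (PySem.Int.bxor x y) z = 0) : PySem.Int.band y z = 0 := by
  rw [pvBandZeroIff] at h1 h2 ⊢
  intro k ⟨hyk, hzk⟩
  have h1k := h1 k
  have h2k := h2 k
  rw [pvTb_bxor] at h2k
  cases hxk : pvTb x k
  · rw [hxk, hyk] at h2k; exact h2k ⟨rfl, hzk⟩
  · exact h1k ⟨hxk, hyk⟩

theorem pvK4 (x y z : Int) (h1 : PySem.Int.band x y = 0)
    (h2 : PySem.Int.band (PySem.Int.bxor x y) z = 0) :
    PySem.Int.band x (PySem.Int.bxor y z) = 0 := by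
  rw [pvBandZeroIff] at h1 h2 ⊢
  intro k ⟨hxk, hc⟩
  rw [pvTb_bxor] at hc
  have h1k := h1 k
  have h2k := h2 k
  rw [pvTb_bxor] at h2k
  have hyk : pvTb y k = false := by
    cases hyk : pvTb y k
    · rfl
    · exact absurd ⟨hxk, hyk⟩ h1k
  rw [hyk] at hc
  have hzk : pvTb z k = false := by
    cases hzk : pvTb z k
    · rfl
    · rw [hxk, hyk] at h2k; exact absurd ⟨rfl, hzk⟩ h2k
  rw [hzk] at hc
  simp at hc

-- xor algebra
theorem pvBxorZeroLeft (x : Int) : PySem.Int.bxor 0 x = x := by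
  rw [PySem.Int.bxor_comm, PySem.Int.bxor_zero]

theorem pvBxorCancel (x y : Int) : PySem.Int.bxor (PySem.Int.bxor x y) x = y := by
  apply pvTb_ext
  intro k
  rw [pvTb_bxor, pvTb_bxor]
  cases pvTb x k <;> cases pvTb y k <;> rfl

theorem pvBxorAssoc (x y z : Int) :
    PySem.Int.bxor (PySem.Int.bxor x y) z = PySem.Int.bxor x (PySem.Int.bxor y z) := by
  apply pvTb_ext
  intro k
  rw [pvTb_bxor, pvTb_bxor, pvTb_bxor, pvTb_bxor]
  cases pvTb x k <;> cases pvTb y k <;> cases pvTb z k <;> rfl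

theorem pvBandZeroLeft (x : Int) : PySem.Int.band 0 x = 0 := by
  rw [PySem.Int.band_comm, PySem.Int.band_zero]

-- ===== program-level proof layer =====
def pvXorW (a : List Int) (l r : Nat) : Int :=
  if _ : l < r then PySem.Int.bxor (a.getD l 0) (pvXorW a (l + 1) r) else 0
termination_by r - l
decreasing_by omega

def pvSumW (a : List Int) (l r : Nat) : Int :=
  if _ : l < r then a.getD l 0 + pvSumW a (l + 1) r else 0
termination_by r - l
decreasing_by omega

-- the xor-accumulating variant of shakutoriScan, the proof's midpoint
def pvXext (a : List Int) (cur : Int) (r : Nat) : Nat :=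
  if _ : r < a.length ∧ PySem.Int.band cur (a.getD r 0) = 0 then
    pvXext a (PySem.Int.bxor cur (a.getD r 0)) (r + 1)
  else r
termination_by a.length - r
decreasing_by omega

-- the window [l, r) extends greedily bit-disjointly at every point
def pvValid (a : List Int) (l r : Nat) : Prop :=
  ∀ i, l ≤ i → i < r → i < a.length ∧ PySem.Int.band (pvXorW a l i) (a.getD i 0) = 0

theorem pvXorW_empty (a : List Int) (l : Nat) : pvXorW a l l = 0 := by
  rw [pvXorW]; simp

theorem pvSumW_empty (a : List Int) (l : Nat) : pvSumW a l l = 0 := by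
  rw [pvSumW]; simp

theorem pvXorW_succ (a : List Int) : ∀ n l r, r - l = n → l ≤ r →
    pvXorW a l (r + 1) = PySem.Int.bxor (pvXorW a l r) (a.getD r 0) := by
  intro n
  induction n with
  | zero =>
    intro l r h1 h2
    have : l = r := by omega
    subst this
    rw [pvXorW_empty, pvBxorZeroLeft, pvXorW, dif_pos (by omega), pvXorW_empty,
      PySem.Int.bxor_zero]
  | succ n ih =>
    intro l r h1 h2
    have hlr : l < r := by omega
    rw [pvXorW, dif_pos (by omega : l < r + 1), ih (l+1) r (by omega) (by omega),
      ← pvBxorAssoc,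
      ← show pvXorW a l r = PySem.Int.bxor (a.getD l 0) (pvXorW a (l+1) r) from by
        rw [pvXorW, dif_pos hlr]]

theorem pvSumW_succ (a : List Int) : ∀ n l r, r - l = n → l ≤ r →
    pvSumW a l (r + 1) = pvSumW a l r + a.getD r 0 := by
  intro n
  induction n with
  | zero =>
    intro l r h1 h2
    have : l = r := by omega
    subst this
    rw [pvSumW_empty, pvSumW, dif_pos (by omega), pvSumW_empty]
    ring
  | succ n ih =>
    intro l r h1 h2
    have hlr : l < r := by omega
    rw [pvSumW, dif_pos (by omega : l < r + 1), ih (l+1) r (by omega) (by omega),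
      ← add_assoc,
      ← show pvSumW a l r = a.getD l 0 + pvSumW a (l+1) r from by
        rw [pvSumW, dif_pos hlr]]

theorem pvValid_mono (a : List Int) (l r r' : Nat) (h : pvValid a l r') (hr : r ≤ r') :
    pvValid a l r := fun i h1 h2 => h i h1 (by omega)

theorem pvValid_extend (a : List Int) (l r : Nat) (h : pvValid a l r) (hl : l ≤ r)
    (hn : r < a.length) (hb : PySem.Int.band (pvXorW a l r) (a.getD r 0) = 0) :
    pvValid a l (r + 1) := by
  intro i h1 h2
  rcases Nat.lt_or_ge i r with hi | hi
  · exact h i h1 hi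
  · have : i = r := by omega
    subst this
    exact ⟨hn, hb⟩

theorem pvSumW_eq_pvXorW (a : List Int) : ∀ n l r, r - l = n → l ≤ r → pvValid a l r →
    pvSumW a l r = pvXorW a l r := by
  intro n
  induction n with
  | zero =>
    intro l r h1 h2 _
    have : r = l := by omega
    subst this
    rw [pvSumW_empty, pvXorW_empty]
  | succ n ih =>
    intro l r h1 h2 hv
    obtain ⟨r', rfl⟩ : ∃ r', r = r' + 1 := ⟨r - 1, by omega⟩
    have hlr : l ≤ r' := by omega
    have hband := (hv r' hlr (by omega)).2
    rw [pvSumW_succ a (r' - l) l r' rfl hlr, pvXorW_succ a (r' - l) l r' rfl hlr,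
      ih l r' (by omega) hlr (pvValid_mono a l r' (r'+1) hv (by omega)),
      ← (pvCondIff _ _).mp hband]

theorem pvXext_ge (a : List Int) : ∀ n cur r, a.length - r = n → r ≤ pvXext a cur r := by
  intro n
  induction n with
  | zero =>
    intro cur r h
    rw [pvXext]
    split
    · next hc => omega
    · omega
  | succ n ih =>
    intro cur r h
    rw [pvXext]
    split
    · next hc =>
      have := ih (PySem.Int.bxor cur (a.getD r 0)) (r + 1) (by omega)
      omega
    · omega

theorem pvScan_eq_pvXext (a : List Int) : ∀ n cur r, a.length - r = n →
    shakutoriScan a cur r = pvXext a cur r := by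
  intro n
  induction n with
  | zero =>
    intro cur r h
    rw [shakutoriScan, pvXext]
    split
    · next hc => omega
    · rfl
  | succ n ih =>
    intro cur r h
    rw [shakutoriScan, pvXext]
    split
    · next hc =>
      rw [pvXorEqOr cur (a.getD r 0) hc.2]
      exact ih _ (r + 1) (by omega)
    · rfl

theorem pvXext_resume (a : List Int) (l : Nat) : ∀ n m, m - l = n → l ≤ m → pvValid a l m →
    pvXext a (pvXorW a l m) m = pvXext a 0 l := by
  intro n
  induction n with
  | zero =>
    intro m h1 h2 _
    have : m = l := by omega
    subst this
    rw [pvXorW_empty]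
  | succ n ih =>
    intro m h1 h2 hv
    obtain ⟨m', rfl⟩ : ∃ m', m = m' + 1 := ⟨m - 1, by omega⟩
    have hlm : l ≤ m' := by omega
    have hcond := hv m' hlm (by omega)
    rw [← ih m' (by omega) hlm (pvValid_mono a l m' (m'+1) hv (by omega))]
    rw [show pvXext a (pvXorW a l m') m' =
        pvXext a (PySem.Int.bxor (pvXorW a l m') (a.getD m' 0)) (m' + 1) from by
      rw [pvXext, dif_pos ⟨hcond.1, hcond.2⟩]]
    rw [pvXorW_succ a (m' - l) l m' rfl hlm]

theorem pvC (a : List Int) (l r : Nat) (hv : pvValid a l r) :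
    ∀ n i, i - (l+1) = n → l + 1 ≤ i → i ≤ r →
    PySem.Int.band (a.getD l 0) (pvXorW a (l+1) i) = 0 := by
  intro n
  induction n with
  | zero =>
    intro i h1 h2 h3
    have : i = l + 1 := by omega
    subst this
    rw [pvXorW_empty, PySem.Int.band_zero]
  | succ n ih =>
    intro i h1 h2 h3
    obtain ⟨i', rfl⟩ : ∃ i', i = i' + 1 := ⟨i - 1, by omega⟩
    have hli : l + 1 ≤ i' := by omega
    have hC := ih i' (by omega) hli (by omega)
    have hcond := (hv i' (by omega) (by omega)).2
    rw [show pvXorW a l i' = PySem.Int.bxor (a.getD l 0) (pvXorW a (l+1) i') from by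
      rw [pvXorW, dif_pos (by omega : l < i')]] at hcond
    rw [pvXorW_succ a (i' - (l+1)) (l+1) i' rfl hli]
    exact pvK4 _ _ _ hC hcond

theorem pvValid_shift (a : List Int) (l r : Nat) (hv : pvValid a l r) :
    pvValid a (l + 1) r := by
  intro i h1 h2
  refine ⟨(hv i (by omega) h2).1, ?_⟩
  have hcond := (hv i (by omega) h2).2
  rw [show pvXorW a l i = PySem.Int.bxor (a.getD l 0) (pvXorW a (l+1) i) from by
    rw [pvXorW, dif_pos (by omega : l < i)]] at hcond
  exact pvK3 _ _ _ (pvC a l r hv (i - (l+1)) i rfl (by omega) (by omega)) hcond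

theorem pvWhile_spec (a : List Int) (l : Nat) : ∀ n r, a.length - r = n →
    l ≤ r → r ≤ a.length → pvValid a l r →
    shakutoriWhile a r (pvSumW a l r) (pvXorW a l r) =
      (pvXext a (pvXorW a l r) r,
       pvSumW a l (pvXext a (pvXorW a l r) r),
       pvXorW a l (pvXext a (pvXorW a l r) r)) ∧
    pvValid a l (pvXext a (pvXorW a l r) r) ∧
    r ≤ pvXext a (pvXorW a l r) r ∧ pvXext a (pvXorW a l r) r ≤ a.length := by
  intro n
  induction n with
  | zero =>
    intro r h1 h2 h3 hv
    have hr : r = a.length := by omega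
    have hstop : ¬ (r < a.length ∧ PySem.Int.band (pvXorW a l r) (a.getD r 0) = 0) := by omega
    rw [shakutoriWhile, pvXext, dif_neg (by
      intro hc
      exact hstop ⟨hc.1, (pvCondIff _ _).mpr (by
        rw [pvSumW_eq_pvXorW a (r - l) l r rfl h2 hv] at hc
        exact hc.2)⟩), dif_neg hstop]
    exact ⟨rfl, hv, by omega, by omega⟩
  | succ n ih =>
    intro r h1 h2 h3 hv
    have hse := pvSumW_eq_pvXorW a (r - l) l r rfl h2 hv
    by_cases hc : r < a.length ∧ PySem.Int.band (pvXorW a l r) (a.getD r 0) = 0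
    · have hcA : r < a.length ∧
          pvSumW a l r + a.getD r 0 = PySem.Int.bxor (pvXorW a l r) (a.getD r 0) := by
        refine ⟨hc.1, ?_⟩
        rw [hse]
        exact (pvCondIff _ _).mp hc.2
      have hv' : pvValid a l (r + 1) := pvValid_extend a l r hv h2 hc.1 hc.2
      have hrec := ih (r + 1) (by omega) (by omega) (by omega) hv'
      rw [shakutoriWhile, dif_pos hcA]
      rw [show pvXext a (pvXorW a l r) r =
          pvXext a (PySem.Int.bxor (pvXorW a l r) (a.getD r 0)) (r + 1) from by
        rw [pvXext, dif_pos hc]]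
      rw [show PySem.Int.bxor (pvXorW a l r) (a.getD r 0) = pvXorW a l (r + 1) from
        (pvXorW_succ a (r - l) l r rfl h2).symm]
      rw [show pvSumW a l r + a.getD r 0 = pvSumW a l (r + 1) from
        (pvSumW_succ a (r - l) l r rfl h2).symm]
      exact ⟨hrec.1, hrec.2.1, by have := hrec.2.2.1; omega, hrec.2.2.2⟩
    · have hcA : ¬ (r < a.length ∧
          pvSumW a l r + a.getD r 0 = PySem.Int.bxor (pvXorW a l r) (a.getD r 0)) := by
        intro hx
        refine hc ⟨hx.1, (pvCondIff _ _).mpr ?_⟩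
        rw [hse] at hx
        exact hx.2
      rw [shakutoriWhile, dif_neg hcA, pvXext, dif_neg hc]
      exact ⟨rfl, hv, by omega, by omega⟩

theorem pvXext_lower (a : List Int) (l : Nat) (hl : l < a.length) :
    l + 1 ≤ pvXext a 0 l := by
  rw [pvXext, dif_pos ⟨hl, pvBandZeroLeft _⟩]
  exact pvXext_ge a (a.length - (l+1)) _ (l+1) rfl

theorem pvMain (a : List Int) : ∀ k l r su su1 ans,
    l + k = a.length → l ≤ r → r ≤ a.length → pvValid a l r →
    su = pvSumW a l r → su1 = pvXorW a l r →
    ((List.range' l k).foldl (shakutoriStep a) (r, su, su1, ans)).2.2.2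
      = (List.range' l k).foldl
          (fun (s : Int) (i : Nat) => s + ((pvXext a 0 i : Int) - (i : Int))) ans := by
  intro k
  induction k with
  | zero => intro l r su su1 ans _ _ _ _ _ _; rfl
  | succ k ih =>
    intro l r su su1 ans hk hlr hrn hv hsu hsu1
    rw [List.range'_succ]
    have hln : l < a.length := by omega
    subst hsu hsu1
    have hw := pvWhile_spec a l (a.length - r) r rfl hlr hrn hv
    set e := pvXext a (pvXorW a l r) r with he
    have hres : e = pvXext a 0 l := by
      rw [he, pvXext_resume a l (r - l) r rfl hlr hv]
    have hel : l + 1 ≤ e := by rw [hres]; exact pvXext_lower a l hln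
    simp only [List.foldl_cons]
    rw [show shakutoriStep a (r, pvSumW a l r, pvXorW a l r, ans) l
        = (e, pvSumW a (l+1) e, pvXorW a (l+1) e, ans + ((e : Int) - (l : Int))) from by
      unfold shakutoriStep
      rw [hw.1]
      simp only
      rw [if_neg (by omega : ¬ l = e)]
      have e1 : pvSumW a l e - a.getD l 0 = pvSumW a (l+1) e := by
        rw [show pvSumW a l e = a.getD l 0 + pvSumW a (l+1) e from by
          rw [pvSumW, dif_pos (by omega : l < e)]]
        ring
      have e2 : PySem.Int.bxor (pvXorW a l e) (a.getD l 0) = pvXorW a (l+1) e := by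
        rw [show pvXorW a l e = PySem.Int.bxor (a.getD l 0) (pvXorW a (l+1) e) from by
          rw [pvXorW, dif_pos (by omega : l < e)]]
        exact pvBxorCancel _ _
      rw [e1, e2]]
    rw [ih (l+1) e _ _ _ (by omega) (by omega) hw.2.2.2
      (pvValid_shift a l e hw.2.1) rfl rfl]
    rw [hres]

theorem pvFoldB (a : List Int) : ∀ (L : List Nat) (ans : Int),
    L.foldl (fun (s : Int) (i : Nat) => s + ((shakutoriScan a 0 i : Int) - (i : Int))) ans
      = L.foldl (fun (s : Int) (i : Nat) => s + ((pvXext a 0 i : Int) - (i : Int))) ans := by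
  intro L
  induction L with
  | nil => intro ans; rfl
  | cons x xs ih =>
    intro ans
    simp only [List.foldl_cons]
    rw [pvScan_eq_pvXext a (a.length - x) 0 x rfl, ih]

theorem shakutori_eq (a : List Int) : shakutori a = shakutori_alt a := by
  unfold shakutori shakutori_alt
  rw [List.range_eq_range']
  rw [pvMain a a.length 0 0 0 0 0 (by omega) (by omega) (by omega)
    (fun i h1 h2 => absurd h2 (by omega)) (pvSumW_empty a 0).symm (pvXorW_empty a 0).symm]
  rw [pvFoldB]

-- ===== VERDICT (by name: the statement is the Claim_ definition above) =====
theorem shakutori_spec : Claim_equal_shakutori := by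
  intro a _
  unfold Spec_shakutori
  exact shakutori_eq a
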